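-- pv_equiv track=rewrite | github.com/SJSU-CS-systems-group/CodEval | convertMD2Html.py | sampleTestCases
-- ===== SOURCE A (Python) =====
-- def sampleTestCases(listOfTC,numOfTC):
--     counter = 0
--     samples = "<pre><code>"
--     for line in listOfTC:
--         if line.startswith('T ',0,2):
--             counter = counter + 1
--             if counter > numOfTC :
--                 break
--             samples = samples + "\n"+"Command to RUN: " + line[2:]
--         elif line.startswith('I '):
--             samples = samples + "<span style=\"color:green\">" + line[2:]+ "</span>"
--         elif line.startswith('O '):
--             samples = samples + "<span style=\"color:blue\">" + line[2:] + "</span>"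
--         elif line.startswith('X '):
--             samples = samples + "Expected Exit Code: " + line[2:]
--         elif line.startswith('E '):
--             samples = samples + "<span style=\"color:Tomato\">" + line[2:] + "</span>"
--         else:
--             continue
--     samples = samples + "</code></pre>"
--     return samples
-- ===== SOURCE B (Python) =====
-- def sampleTestCases(listOfTC, numOfTC):
--     # index-based: find the cutoff (the (max(numOfTC,0)+1)-th 'T ' line, if any),
--     # then format the prefix with a prefix-dispatch and join once
--     t_positions = [i for i, line in enumerate(listOfTC) if line.startswith('T ')]
--     m = max(numOfTC, 0)
--     cutoff = t_positions[m] if m < len(t_positions) else len(listOfTC)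
--     parts = []
--     for line in listOfTC[:cutoff]:
--         rest = line[2:]
--         if line.startswith('T '):
--             parts.append('\nCommand to RUN: ' + rest)
--         elif line.startswith('I '):
--             parts.append('<span style="color:green">' + rest + '</span>')
--         elif line.startswith('O '):
--             parts.append('<span style="color:blue">' + rest + '</span>')
--         elif line.startswith('X '):
--             parts.append('Expected Exit Code: ' + rest)
--         elif line.startswith('E '):
--             parts.append('<span style="color:Tomato">' + rest + '</span>')
--     return '<pre><code>' + ''.join(parts) + '</code></pre>'
-- ===== Notes on version B (the rewrite author's own statement) =====
-- stated objective: alternative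
-- what changed: B first computes the cutoff position (the (max(numOfTC,0)+1)-th 'T '-prefixed line, or the end of the list) from an index scan, then formats only the prefix before the cutoff with a per-line dispatch collected into a list joined once, instead of A's single loop with a counter, early break and repeated string concatenation onto an accumulator.
import Mathlib
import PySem

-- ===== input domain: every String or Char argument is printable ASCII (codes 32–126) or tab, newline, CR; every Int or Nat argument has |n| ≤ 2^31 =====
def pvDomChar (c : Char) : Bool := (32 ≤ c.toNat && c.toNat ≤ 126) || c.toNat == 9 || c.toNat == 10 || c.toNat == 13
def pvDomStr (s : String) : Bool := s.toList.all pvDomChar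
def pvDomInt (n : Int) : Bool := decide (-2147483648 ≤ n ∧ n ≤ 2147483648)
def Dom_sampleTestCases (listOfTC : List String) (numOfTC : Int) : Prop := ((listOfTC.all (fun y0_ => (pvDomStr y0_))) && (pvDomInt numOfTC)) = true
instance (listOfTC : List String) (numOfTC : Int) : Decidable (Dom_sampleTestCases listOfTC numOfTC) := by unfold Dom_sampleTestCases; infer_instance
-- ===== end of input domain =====

-- B precomputes the break position (the (max(numOfTC,0)+1)-th 'T ' line) and then formats the
-- prefix with a per-line dispatch joined once — a different decomposition, not faster.

-- ===== PORT A =====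
-- literal port of A's loop: accumulator string + counter, early break on the excess 'T ' line
def sampleTestCasesGo (numOfTC : Int) : List String → Int → String → String
  | [], _, samples => samples
  | line :: rest, counter, samples =>
    if PySem.Str.startswith line "T " then
      if counter + 1 > numOfTC then samples
      else sampleTestCasesGo numOfTC rest (counter + 1)
        (samples ++ "\n" ++ "Command to RUN: " ++ PySem.Str.slice line (some 2) none)
    else if PySem.Str.startswith line "I " then
      sampleTestCasesGo numOfTC rest counter
        (samples ++ "<span style=\"color:green\">" ++ PySem.Str.slice line (some 2) none ++ "</span>")
    else if PySem.Str.startswith line "O " then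
      sampleTestCasesGo numOfTC rest counter
        (samples ++ "<span style=\"color:blue\">" ++ PySem.Str.slice line (some 2) none ++ "</span>")
    else if PySem.Str.startswith line "X " then
      sampleTestCasesGo numOfTC rest counter
        (samples ++ "Expected Exit Code: " ++ PySem.Str.slice line (some 2) none)
    else if PySem.Str.startswith line "E " then
      sampleTestCasesGo numOfTC rest counter
        (samples ++ "<span style=\"color:Tomato\">" ++ PySem.Str.slice line (some 2) none ++ "</span>")
    else
      sampleTestCasesGo numOfTC rest counter samples

def sampleTestCases (listOfTC : List String) (numOfTC : Int) : String :=
  sampleTestCasesGo numOfTC listOfTC 0 "<pre><code>" ++ "</code></pre>"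

-- ===== PORT B =====
-- Source B's per-line dispatch (the body of the 'for line in listOfTC[:cutoff]' loop)
def sampleTestCasesFmt (line : String) : Option String :=
  let rest := PySem.Str.slice line (some 2) none
  if PySem.Str.startswith line "T " then some ("\nCommand to RUN: " ++ rest)
  else if PySem.Str.startswith line "I " then some ("<span style=\"color:green\">" ++ rest ++ "</span>")
  else if PySem.Str.startswith line "O " then some ("<span style=\"color:blue\">" ++ rest ++ "</span>")
  else if PySem.Str.startswith line "X " then some ("Expected Exit Code: " ++ rest)
  else if PySem.Str.startswith line "E " then some ("<span style=\"color:Tomato\">" ++ rest ++ "</span>")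
  else none

def sampleTestCases_alt (listOfTC : List String) (numOfTC : Int) : String :=
  let tPositions : List Int := (PySem.List.enumerate listOfTC).filterMap
    (fun p => if PySem.Str.startswith p.2 "T " then some p.1 else none)
  let m : Int := max numOfTC 0
  let cutoff : Int :=
    if m < (tPositions.length : Int) then (PySem.List.pyGet? tPositions m).getD 0
    else (listOfTC.length : Int)
  let parts : List String := (PySem.List.slice listOfTC none (some cutoff)).filterMap sampleTestCasesFmt
  "<pre><code>" ++ PySem.Str.join "" parts ++ "</code></pre>"

-- ===== PRECONDITION & SPEC =====
def Spec_sampleTestCases (listOfTC : List String) (numOfTC : Int) (out : String) : Prop := out = sampleTestCases_alt listOfTC numOfTC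
instance (listOfTC : List String) (numOfTC : Int) (out : String) : Decidable (Spec_sampleTestCases listOfTC numOfTC out) := by unfold Spec_sampleTestCases; infer_instance

-- ===== CLAIM (what is proved, stated in full; the proofs are below) =====
def Claim_equal_sampleTestCases : Prop := ∀ (listOfTC : List String) (numOfTC : Int), Dom_sampleTestCases listOfTC numOfTC → Spec_sampleTestCases listOfTC numOfTC (sampleTestCases listOfTC numOfTC)

-- ===== LEMMAS AND PROOFS =====

-- the number of lines A processes before it stops, as a function of the remaining budget b
def pvCut : List String → Int → Nat
  | [], _ => 0
  | x :: xs, b =>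
    if PySem.Str.startswith x "T " then
      (if b ≤ 0 then 0 else pvCut xs (b - 1) + 1)
    else pvCut xs b + 1

theorem pvJoin_nil : PySem.Str.join "" ([] : List String) = "" := by
  rw [← String.toList_inj]; simp [PySem.Str.toList_join, PySem.Chars.join_nil]

theorem pvJoin_cons (p : String) (ps : List String) :
    PySem.Str.join "" (p :: ps) = p ++ PySem.Str.join "" ps := by
  rw [← String.toList_inj]
  cases ps with
  | nil => simp [PySem.Str.toList_join, PySem.Chars.join_singleton, PySem.Chars.join_nil,
      String.toList_append]
  | cons q qs => simp [PySem.Str.toList_join, PySem.Chars.join_cons_cons, String.toList_append]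

theorem pvCmdLit : "\n" ++ "Command to RUN: " = "\nCommand to RUN: " := by decide

-- A's loop, with the accumulator pulled out, is: format the first pvCut lines and join
theorem pvGo_eq (numOfTC : Int) (xs : List String) :
    ∀ (counter : Int) (acc : String),
      sampleTestCasesGo numOfTC xs counter acc =
        acc ++ PySem.Str.join ""
          ((xs.take (pvCut xs (numOfTC - counter))).filterMap sampleTestCasesFmt) := by
  induction xs with
  | nil =>
    intro counter acc
    rw [sampleTestCasesGo]
    simp [pvJoin_nil]
  | cons x xs ih =>
    intro counter acc
    by_cases hT : PySem.Str.startswith x "T " = true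
    · by_cases hb : numOfTC - counter ≤ 0
      · have e1 : sampleTestCasesGo numOfTC (x :: xs) counter acc = acc := by
          rw [sampleTestCasesGo, if_pos hT, if_pos (by omega : counter + 1 > numOfTC)]
        have e2 : pvCut (x :: xs) (numOfTC - counter) = 0 := by
          rw [pvCut, if_pos hT, if_pos hb]
        rw [e1, e2]
        simp [pvJoin_nil]
      · have e1 : sampleTestCasesGo numOfTC (x :: xs) counter acc =
            sampleTestCasesGo numOfTC xs (counter + 1)
              (acc ++ "\n" ++ "Command to RUN: " ++ PySem.Str.slice x (some 2) none) := by
          rw [sampleTestCasesGo, if_pos hT, if_neg (by omega : ¬ counter + 1 > numOfTC)]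
        have e2 : pvCut (x :: xs) (numOfTC - counter) = pvCut xs (numOfTC - counter - 1) + 1 := by
          rw [pvCut, if_pos hT, if_neg hb]
        have e3 : sampleTestCasesFmt x =
            some ("\nCommand to RUN: " ++ PySem.Str.slice x (some 2) none) := by
          rw [sampleTestCasesFmt, if_pos hT]
        rw [e1, ih, e2, List.take_succ_cons, List.filterMap_cons_some e3, pvJoin_cons,
          (by ring : numOfTC - (counter + 1) = numOfTC - counter - 1), ← pvCmdLit]
        simp [String.append_assoc]
    · have e2 : pvCut (x :: xs) (numOfTC - counter) = pvCut xs (numOfTC - counter) + 1 := by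
        rw [pvCut, if_neg hT]
      by_cases hI : PySem.Str.startswith x "I " = true
      · have e1 : sampleTestCasesGo numOfTC (x :: xs) counter acc =
            sampleTestCasesGo numOfTC xs counter
              (acc ++ "<span style=\"color:green\">" ++ PySem.Str.slice x (some 2) none ++ "</span>") := by
          rw [sampleTestCasesGo, if_neg hT, if_pos hI]
        have e3 : sampleTestCasesFmt x =
            some ("<span style=\"color:green\">" ++ PySem.Str.slice x (some 2) none ++ "</span>") := by
          rw [sampleTestCasesFmt, if_neg hT, if_pos hI]
        rw [e1, ih, e2, List.take_succ_cons, List.filterMap_cons_some e3, pvJoin_cons]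
        simp [String.append_assoc]
      · by_cases hO : PySem.Str.startswith x "O " = true
        · have e1 : sampleTestCasesGo numOfTC (x :: xs) counter acc =
              sampleTestCasesGo numOfTC xs counter
                (acc ++ "<span style=\"color:blue\">" ++ PySem.Str.slice x (some 2) none ++ "</span>") := by
            rw [sampleTestCasesGo, if_neg hT, if_neg hI, if_pos hO]
          have e3 : sampleTestCasesFmt x =
              some ("<span style=\"color:blue\">" ++ PySem.Str.slice x (some 2) none ++ "</span>") := by
            rw [sampleTestCasesFmt, if_neg hT, if_neg hI, if_pos hO]
          rw [e1, ih, e2, List.take_succ_cons, List.filterMap_cons_some e3, pvJoin_cons]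
          simp [String.append_assoc]
        · by_cases hX : PySem.Str.startswith x "X " = true
          · have e1 : sampleTestCasesGo numOfTC (x :: xs) counter acc =
                sampleTestCasesGo numOfTC xs counter
                  (acc ++ "Expected Exit Code: " ++ PySem.Str.slice x (some 2) none) := by
              rw [sampleTestCasesGo, if_neg hT, if_neg hI, if_neg hO, if_pos hX]
            have e3 : sampleTestCasesFmt x =
                some ("Expected Exit Code: " ++ PySem.Str.slice x (some 2) none) := by
              rw [sampleTestCasesFmt, if_neg hT, if_neg hI, if_neg hO, if_pos hX]
            rw [e1, ih, e2, List.take_succ_cons, List.filterMap_cons_some e3, pvJoin_cons]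
            simp [String.append_assoc]
          · by_cases hE : PySem.Str.startswith x "E " = true
            · have e1 : sampleTestCasesGo numOfTC (x :: xs) counter acc =
                  sampleTestCasesGo numOfTC xs counter
                    (acc ++ "<span style=\"color:Tomato\">" ++ PySem.Str.slice x (some 2) none ++ "</span>") := by
                rw [sampleTestCasesGo, if_neg hT, if_neg hI, if_neg hO, if_neg hX, if_pos hE]
              have e3 : sampleTestCasesFmt x =
                  some ("<span style=\"color:Tomato\">" ++ PySem.Str.slice x (some 2) none ++ "</span>") := by
                rw [sampleTestCasesFmt, if_neg hT, if_neg hI, if_neg hO, if_neg hX, if_pos hE]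
              rw [e1, ih, e2, List.take_succ_cons, List.filterMap_cons_some e3, pvJoin_cons]
              simp [String.append_assoc]
            · have e1 : sampleTestCasesGo numOfTC (x :: xs) counter acc =
                  sampleTestCasesGo numOfTC xs counter acc := by
                rw [sampleTestCasesGo, if_neg hT, if_neg hI, if_neg hO, if_neg hX, if_neg hE]
              have e3 : sampleTestCasesFmt x = none := by
                rw [sampleTestCasesFmt, if_neg hT, if_neg hI, if_neg hO, if_neg hX, if_neg hE]
              rw [e1, ih, e2, List.take_succ_cons, List.filterMap_cons_none e3]

-- B's positions list, as used by sampleTestCases_alt, at an arbitrary enumeration start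
def pvTpos (s : Int) (xs : List String) : List Int :=
  (PySem.List.enumerate xs s).filterMap
    (fun p => if PySem.Str.startswith p.2 "T " then some p.1 else none)

theorem pvTpos_nil (s : Int) : pvTpos s [] = [] := by
  rw [pvTpos, PySem.List.enumerate_nil]
  rfl

theorem pvTpos_cons_T (s : Int) (x : String) (xs : List String)
    (hT : PySem.Str.startswith x "T " = true) :
    pvTpos s (x :: xs) = s :: pvTpos (s + 1) xs := by
  rw [pvTpos, PySem.List.enumerate_cons, pvTpos]
  exact List.filterMap_cons_some (by
    show (if PySem.Str.startswith x "T " = true then some s else none) = some s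
    rw [if_pos hT])

theorem pvTpos_cons_not_T (s : Int) (x : String) (xs : List String)
    (hT : ¬ PySem.Str.startswith x "T " = true) :
    pvTpos s (x :: xs) = pvTpos (s + 1) xs := by
  rw [pvTpos, PySem.List.enumerate_cons, pvTpos]
  exact List.filterMap_cons_none (by
    show (if PySem.Str.startswith x "T " = true then some s else none) = none
    rw [if_neg hT])

theorem pvTpos_get (xs : List String) : ∀ (s b : Int), 0 ≤ b →
    (if b < ((pvTpos s xs).length : Int) then (PySem.List.pyGet? (pvTpos s xs) b).getD 0
     else s + xs.length) = s + pvCut xs b := by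
  induction xs with
  | nil =>
    intro s b hb
    rw [pvTpos_nil, if_neg (by simp; omega), pvCut]
    simp
  | cons x xs ih =>
    intro s b hb
    by_cases hT : PySem.Str.startswith x "T " = true
    · rw [pvTpos_cons_T s x xs hT]
      by_cases hb0 : b ≤ 0
      · have hb' : b = 0 := le_antisymm hb0 hb
        subst hb'
        have h0 : PySem.List.pyGet? (s :: pvTpos (s + 1) xs) 0 = some s := by
          have := PySem.List.pyGet?_natCast (s :: pvTpos (s + 1) xs) 0
          simpa using this
        rw [if_pos (by simp), h0, pvCut, if_pos hT, if_pos le_rfl]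
        simp
      · have key := ih (s + 1) (b - 1) (by omega)
        obtain ⟨n, hn⟩ : ∃ n : Nat, b = (n : Int) + 1 := ⟨(b - 1).toNat, by omega⟩
        have hget : PySem.List.pyGet? (s :: pvTpos (s + 1) xs) b
            = PySem.List.pyGet? (pvTpos (s + 1) xs) (b - 1) := by
          subst hn
          have h1 := PySem.List.pyGet?_natCast (s :: pvTpos (s + 1) xs) (n + 1)
          have h2 := PySem.List.pyGet?_natCast (pvTpos (s + 1) xs) n
          push_cast at h1 ⊢
          rw [h1]
          simpa using h2.symm
        rw [pvCut, if_pos hT, if_neg hb0]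
        by_cases hlen : b - 1 < ((pvTpos (s + 1) xs).length : Int)
        · rw [if_pos (by rw [List.length_cons]; push_cast; omega), hget]
          rw [if_pos hlen] at key
          rw [key]
          push_cast
          ring
        · rw [if_neg (by rw [List.length_cons]; push_cast; omega)]
          rw [if_neg hlen] at key
          rw [List.length_cons]
          push_cast at key ⊢
          omega
    · rw [pvTpos_cons_not_T s x xs hT]
      have key := ih (s + 1) b hb
      rw [pvCut, if_neg hT]
      by_cases hlen : b < ((pvTpos (s + 1) xs).length : Int)
      · rw [if_pos hlen]
        rw [if_pos hlen] at key
        rw [key]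
        push_cast
        ring
      · rw [if_neg hlen]
        rw [if_neg hlen] at key
        rw [List.length_cons]
        push_cast at key ⊢
        omega

theorem pvCut_max (xs : List String) : ∀ b : Int, pvCut xs (max b 0) = pvCut xs b := by
  induction xs with
  | nil => intro b; rw [pvCut, pvCut]
  | cons x xs ih =>
    intro b
    by_cases hT : PySem.Str.startswith x "T " = true
    · by_cases hb : b ≤ 0
      · rw [pvCut, pvCut, if_pos hT, if_pos hT, if_pos hb,
          if_pos (by omega : max b 0 ≤ 0)]
      · rw [pvCut, pvCut, if_pos hT, if_pos hT, if_neg hb,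
          if_neg (by omega : ¬ max b 0 ≤ 0), (by omega : max b 0 - 1 = b - 1)]
    · rw [pvCut, pvCut, if_neg hT, if_neg hT, ih]

theorem pvAlt_eq (listOfTC : List String) (numOfTC : Int) :
    sampleTestCases_alt listOfTC numOfTC =
      "<pre><code>" ++ PySem.Str.join ""
        ((listOfTC.take (pvCut listOfTC numOfTC)).filterMap sampleTestCasesFmt) ++ "</code></pre>" := by
  have hc := pvTpos_get listOfTC 0 (max numOfTC 0) (le_max_right _ _)
  rw [pvCut_max] at hc
  rw [zero_add] at hc
  show "<pre><code>" ++ PySem.Str.join "" (List.filterMap sampleTestCasesFmt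
      (PySem.List.slice listOfTC none (some
        (if max numOfTC 0 < ((pvTpos 0 listOfTC).length : Int)
         then (PySem.List.pyGet? (pvTpos 0 listOfTC) (max numOfTC 0)).getD 0
         else (listOfTC.length : Int))))) ++ "</code></pre>" = _
  rw [hc, PySem.List.slice_to listOfTC (by positivity)]
  simp

-- ===== VERDICT (by name: the statement is the Claim_ definition above) =====
theorem sampleTestCases_spec : Claim_equal_sampleTestCases := by
  intro listOfTC numOfTC _
  unfold Spec_sampleTestCases sampleTestCases
  rw [pvGo_eq, pvAlt_eq]
  simp
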